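-- pv_equiv track=rewrite | github.com/Phonlin/schedule-optimizer | app.py | _rl
-- ===== SOURCE A (Python) =====
-- def _rl(indices: list[int]) -> list[int]:
--     """計算連續索引段的各段長度。"""
--     if not indices:
--         return []
--     runs, length = [], 1
--     for i in range(1, len(indices)):
--         if indices[i] == indices[i - 1] + 1:
--             length += 1
--         else:
--             runs.append(length)
--             length = 1
--     runs.append(length)
--     return runs
-- ===== SOURCE B (Python) =====
-- def _rl(indices: list[int]) -> list[int]:
--     if not indices:
--         return []
--     n = len(indices)
--     boundaries = [0] + [i for i in range(1, n) if indices[i] != indices[i - 1] + 1] + [n]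
--     return [b - a for a, b in zip(boundaries, boundaries[1:])]
-- ===== Notes on version B (the rewrite author's own statement) =====
-- stated objective: alternative
-- what changed: B first collects the list of run-boundary positions (0, every break index, len) and then returns the successive differences of that boundary list, instead of accumulating a running run length inside one scan.
import Mathlib
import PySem

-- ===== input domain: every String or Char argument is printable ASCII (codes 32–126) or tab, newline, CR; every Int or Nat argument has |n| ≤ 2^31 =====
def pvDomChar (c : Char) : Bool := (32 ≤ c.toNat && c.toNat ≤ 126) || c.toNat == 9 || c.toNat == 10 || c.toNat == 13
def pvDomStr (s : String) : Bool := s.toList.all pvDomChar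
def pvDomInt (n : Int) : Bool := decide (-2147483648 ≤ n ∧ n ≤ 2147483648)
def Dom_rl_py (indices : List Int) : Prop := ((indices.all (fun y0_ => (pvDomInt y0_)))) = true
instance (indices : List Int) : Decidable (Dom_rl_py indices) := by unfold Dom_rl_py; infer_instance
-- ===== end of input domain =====

-- B replaces A's single scan with a running run length by a boundary-position pass followed by a
-- successive-differences pass (alternative decomposition, same cost).

-- ===== PORT A =====
-- literal port of A: one fold over range(1, len(indices)) carrying (runs, length)
def rl_py (indices : List Int) : List Int :=
  if indices = [] then []
  else
    let s := (PySem.List.pyRange 1 (indices.length : Int) 1).foldl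
      (fun (st : List Int × Int) i =>
        if PySem.List.pyGetD indices i 0 = PySem.List.pyGetD indices (i - 1) 0 + 1
        then (st.1, st.2 + 1)
        else (st.1 ++ [st.2], 1)) ([], 1)
    s.1 ++ [s.2]

-- ===== PORT B =====
-- literal port of Source B: boundary list [0] + break positions + [n], then differences of adjacent
-- boundaries via zip
def rl_py_alt (indices : List Int) : List Int :=
  if indices = [] then []
  else
    let n : Int := indices.length
    let boundaries : List Int :=
      (0 :: (PySem.List.pyRange 1 n 1).filter
        (fun i => !(PySem.List.pyGetD indices i 0 == PySem.List.pyGetD indices (i - 1) 0 + 1))) ++ [n]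
    (boundaries.zip (boundaries.drop 1)).map (fun p => p.2 - p.1)

-- ===== PRECONDITION & SPEC =====
def Spec_rl_py (indices : List Int) (out : List Int) : Prop := out = rl_py_alt indices
instance (indices : List Int) (out : List Int) : Decidable (Spec_rl_py indices out) := by unfold Spec_rl_py; infer_instance

-- ===== CLAIM (what is proved, stated in full; the proofs are below) =====
def Claim_equal_rl_py : Prop := ∀ (indices : List Int), Dom_rl_py indices → Spec_rl_py indices (rl_py indices)

-- ===== LEMMAS AND PROOFS =====

-- adjacent differences, recursively (proof-side mirror of B's zip expression)
def pvAdj : List Int → List Int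
  | a :: b :: t => (b - a) :: pvAdj (b :: t)
  | _ => []

-- last element of a nonempty list (0 on []), structurally
def pvLast : List Int → Int
  | [] => 0
  | [a] => a
  | _ :: b :: t => pvLast (b :: t)

theorem pvAdj_eq_zip : ∀ (xs : List Int),
    (xs.zip (xs.drop 1)).map (fun p => p.2 - p.1) = pvAdj xs
  | [] => rfl
  | [_] => rfl
  | a :: b :: t => by
    have ih := pvAdj_eq_zip (b :: t)
    simp only [List.drop_one, List.tail_cons, List.zip_cons_cons, List.map_cons, pvAdj] at *
    rw [ih]

theorem pvLast_concat : ∀ (xs : List Int) (b : Int), pvLast (xs ++ [b]) = b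
  | [], _ => rfl
  | [_], _ => rfl
  | _ :: y :: t, b => pvLast_concat (y :: t) b

theorem pvAdj_append : ∀ (xs : List Int) (b : Int), xs ≠ [] →
    pvAdj (xs ++ [b]) = pvAdj xs ++ [b - pvLast xs]
  | [], _, h => absurd rfl h
  | [_], _, _ => rfl
  | a :: c :: t, b, _ => by
    have ih := pvAdj_append (c :: t) b (by simp)
    simp only [List.cons_append, pvAdj, pvLast] at ih ⊢
    rw [ih]

-- fold invariant: after processing range(1, k), the accumulated runs are the adjacent differences
-- of the boundary list collected so far, and the running length is k minus the last boundary
theorem pv_inv (indices : List Int) (k : Nat) (hk : 1 ≤ k) :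
    ((PySem.List.pyRange 1 (k : Int) 1).foldl
        (fun (st : List Int × Int) i =>
          if PySem.List.pyGetD indices i 0 = PySem.List.pyGetD indices (i - 1) 0 + 1
          then (st.1, st.2 + 1)
          else (st.1 ++ [st.2], 1)) ([], 1)).1
      = pvAdj (0 :: (PySem.List.pyRange 1 (k : Int) 1).filter
          (fun i => !(PySem.List.pyGetD indices i 0 == PySem.List.pyGetD indices (i - 1) 0 + 1)))
    ∧ ((PySem.List.pyRange 1 (k : Int) 1).foldl
        (fun (st : List Int × Int) i =>
          if PySem.List.pyGetD indices i 0 = PySem.List.pyGetD indices (i - 1) 0 + 1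
          then (st.1, st.2 + 1)
          else (st.1 ++ [st.2], 1)) ([], 1)).2
      = (k : Int) - pvLast (0 :: (PySem.List.pyRange 1 (k : Int) 1).filter
          (fun i => !(PySem.List.pyGetD indices i 0 == PySem.List.pyGetD indices (i - 1) 0 + 1))) := by
  induction k with
  | zero => omega
  | succ m ih =>
    by_cases hm : 1 ≤ m
    · have hc : ((m + 1 : Nat) : Int) = (m : Int) + 1 := by push_cast; ring
      obtain ⟨ih1, ih2⟩ := ih hm
      rw [hc, PySem.List.pyRange_one_succ_right (by exact_mod_cast hm),
          List.foldl_append, List.filter_append, List.foldl_cons, List.foldl_nil]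
      by_cases hp : PySem.List.pyGetD indices (m : Int) 0
          = PySem.List.pyGetD indices ((m : Int) - 1) 0 + 1
      · have hbt : (PySem.List.pyGetD indices (m : Int) 0
            == PySem.List.pyGetD indices ((m : Int) - 1) 0 + 1) = true := beq_iff_eq.mpr hp
        have hF2 : List.filter
            (fun i => !(PySem.List.pyGetD indices i 0 == PySem.List.pyGetD indices (i - 1) 0 + 1))
            [(m : Int)] = [] := by
          simp only [List.filter_cons, List.filter_nil, hbt, Bool.not_true, Bool.false_eq_true, if_false]
        rw [if_pos hp, hF2, List.append_nil]
        refine ⟨ih1, ?_⟩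
        show _ + 1 = _
        rw [ih2]; ring
      · have hbf : (PySem.List.pyGetD indices (m : Int) 0
            == PySem.List.pyGetD indices ((m : Int) - 1) 0 + 1) = false :=
          beq_eq_false_iff_ne.mpr hp
        have hF2 : List.filter
            (fun i => !(PySem.List.pyGetD indices i 0 == PySem.List.pyGetD indices (i - 1) 0 + 1))
            [(m : Int)] = [(m : Int)] := by
          simp only [List.filter_cons, List.filter_nil, hbf, Bool.not_false, if_true]
        rw [if_neg hp, hF2, ← List.cons_append, pvAdj_append _ _ (by simp), pvLast_concat]
        constructor
        · show _ ++ [_] = _ ++ [_]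
          rw [ih1, ih2]
        · show (1 : Int) = _
          ring
    · have hm0 : m = 0 := by omega
      subst hm0
      have hc : ((0 + 1 : Nat) : Int) = 1 := by norm_num
      rw [hc]
      have h0 : PySem.List.pyRange 1 1 1 = [] := by decide
      rw [h0]
      exact ⟨rfl, by simp [pvLast]⟩

-- ===== VERDICT (by name: the statement is the Claim_ definition above) =====
theorem rl_py_spec : Claim_equal_rl_py := by
  intro indices _
  unfold Spec_rl_py rl_py rl_py_alt
  by_cases h : indices = []
  · simp [h]
  · rw [if_neg h, if_neg h]
    have hlen : 1 ≤ indices.length := by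
      cases indices with
      | nil => exact absurd rfl h
      | cons a t => simp
    obtain ⟨h1, h2⟩ := pv_inv indices indices.length hlen
    show _ ++ [_] = ((((0 :: (PySem.List.pyRange 1 (indices.length : Int) 1).filter
        (fun i => !(PySem.List.pyGetD indices i 0 == PySem.List.pyGetD indices (i - 1) 0 + 1))) ++ [(indices.length : Int)]).zip _).map _)
    rw [pvAdj_eq_zip, pvAdj_append _ _ (by simp), ← h1, ← h2]
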